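-- pv_equiv track=rewrite | github.com/jungmiin/Algorithm | 프로그래머스/unrated/150369. 택배 배달과 수거하기/택배 배달과 수거하기.py | solution
-- ===== SOURCE A (Python) =====
-- def solution(cap, n, deliveries, pickups):
--     answer = 0
--     d = 0
--     p = 0
--     for i in range(-1, -n-1, -1):
--         d += deliveries[i]
--         p += pickups[i]
--         while d > 0 or p > 0:
--             answer += (n+i+1)*2
--             d -= cap
--             p -= cap
--     return answer
-- ===== SOURCE B (Python) =====
-- def solution(cap, n, deliveries, pickups):
--     # Number of trips per position by one ceiling division instead of a per-trip while loop.
--     answer = 0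
--     d = 0
--     p = 0
--     for k in range(1, n + 1):
--         d += deliveries[-k]
--         p += pickups[-k]
--         m = max(d, p)
--         if m > 0:
--             t = -(-m // cap)          # trips needed from this position
--             answer += t * (n - k + 1) * 2
--             d -= t * cap
--             p -= t * cap
--     return answer
-- ===== Notes on version B (the rewrite author's own statement) =====
-- stated objective: alternative
-- what changed: The per-trip inner while loop (one iteration per capacity-load of the accumulated demand) is replaced by a single ceiling-division per position computing the number of trips directly; on inputs whose loads are comparable to cap the two have the same cost, so no speed is claimed.
import Mathlib
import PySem

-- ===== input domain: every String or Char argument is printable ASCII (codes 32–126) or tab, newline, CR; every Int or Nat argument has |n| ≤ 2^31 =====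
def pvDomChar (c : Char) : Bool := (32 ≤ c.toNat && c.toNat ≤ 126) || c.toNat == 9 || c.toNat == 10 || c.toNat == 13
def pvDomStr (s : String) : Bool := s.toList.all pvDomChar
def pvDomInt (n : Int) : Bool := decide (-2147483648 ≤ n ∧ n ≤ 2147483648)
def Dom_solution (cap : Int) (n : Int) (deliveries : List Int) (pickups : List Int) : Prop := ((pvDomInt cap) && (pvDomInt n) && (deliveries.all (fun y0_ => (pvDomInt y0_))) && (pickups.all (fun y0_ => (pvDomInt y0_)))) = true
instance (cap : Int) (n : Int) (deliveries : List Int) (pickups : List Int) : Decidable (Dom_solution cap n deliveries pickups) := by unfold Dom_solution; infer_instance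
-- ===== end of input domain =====

-- B replaces A's per-trip inner while loop by one ceiling division per position (alternative algorithm; no speed claim).

-- ===== PORT A =====
-- inner 'while d > 0 or p > 0: answer += add; d -= cap; p -= cap'; state (d, p, answer).
-- The 'if 0 < cap' guard only makes the recursion total: when cap ≤ 0 and the condition
-- holds, Python diverges — those inputs are excluded by Pre_solution.
def pyWhile (cap add : Int) (d p a : Int) : Int × Int × Int :=
  if d > 0 ∨ p > 0 then
    if 0 < cap then pyWhile cap add (d - cap) (p - cap) (a + add)
    else (d, p, a)
  else (d, p, a)
termination_by (max d p).toNat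
decreasing_by
  rename_i h hc
  rcases le_total d p with hle | hle
  · rw [max_eq_right hle, max_eq_right (by omega : d - cap ≤ p - cap)]; omega
  · rw [max_eq_left hle, max_eq_left (by omega : p - cap ≤ d - cap)]; omega

-- deliveries[i]/pickups[i]: pyGetD (IndexError excluded by Pre_solution)
def solution (cap : Int) (n : Int) (deliveries : List Int) (pickups : List Int) : Int :=
  ((PySem.List.pyRange (-1) (-n - 1) (-1)).foldl
    (fun (st : Int × Int × Int) i =>
      pyWhile cap ((n + i + 1) * 2)
        (st.1 + PySem.List.pyGetD deliveries i 0)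
        (st.2.1 + PySem.List.pyGetD pickups i 0)
        st.2.2)
    (0, 0, 0)).2.2

-- ===== PORT B =====
def solution_alt (cap : Int) (n : Int) (deliveries : List Int) (pickups : List Int) : Int :=
  ((PySem.List.pyRange 1 (n + 1) 1).foldl
    (fun (st : Int × Int × Int) k =>
      let d := st.1 + PySem.List.pyGetD deliveries (-k) 0
      let p := st.2.1 + PySem.List.pyGetD pickups (-k) 0
      let m := max d p
      if 0 < m then
        let t := -(PySem.Int.floordiv (-m) cap)    -- t = -(-m // cap), ceiling division
        (d - t * cap, p - t * cap, st.2.2 + t * (n - k + 1) * 2)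
      else (d, p, st.2.2))
    (0, 0, 0)).2.2

-- ===== PRECONDITION & SPEC =====
-- Pre_solution is exactly where Python A returns normally: indices in range (n ≤ both lengths,
-- unless n ≤ 0 makes the loop empty), and the while loop terminates: cap > 0, or every
-- cumulative suffix load (deliveries and pickups) is nonpositive so the loop never runs.
def Pre_solution (cap : Int) (n : Int) (deliveries : List Int) (pickups : List Int) : Prop :=
  n ≤ 0 ∨
    (n ≤ deliveries.length ∧ n ≤ pickups.length ∧
      (0 < cap ∨ ∀ j ∈ List.range n.toNat,
        (deliveries.drop (deliveries.length - (j + 1))).sum ≤ 0 ∧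
        (pickups.drop (pickups.length - (j + 1))).sum ≤ 0))
instance (cap : Int) (n : Int) (deliveries : List Int) (pickups : List Int) : Decidable (Pre_solution cap n deliveries pickups) := by unfold Pre_solution; infer_instance

def pvWitness_solution : Int × Int × List Int × List Int := (4, 2, [2, 3], [1, 2])

def Spec_solution (cap : Int) (n : Int) (deliveries : List Int) (pickups : List Int) (out : Int) : Prop := out = solution_alt cap n deliveries pickups
instance (cap : Int) (n : Int) (deliveries : List Int) (pickups : List Int) (out : Int) : Decidable (Spec_solution cap n deliveries pickups out) := by unfold Spec_solution; infer_instance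

-- ===== CLAIM (what is proved, stated in full; the proofs are below) =====
def Claim_equal_solution : Prop := ∀ (cap : Int) (n : Int) (deliveries : List Int) (pickups : List Int), Dom_solution cap n deliveries pickups → Pre_solution cap n deliveries pickups → Spec_solution cap n deliveries pickups (solution cap n deliveries pickups)

-- ===== LEMMAS AND PROOFS =====

-- A's countdown index list is B's count-up list negated.
lemma range_neg (n : Int) :
    PySem.List.pyRange (-1) (-n - 1) (-1) = (PySem.List.pyRange 1 (n + 1) 1).map (fun k => -k) := by
  rw [PySem.List.pyRange_neg_one, PySem.List.pyRange_one, List.map_map]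
  have : (-1 - (-n - 1)).toNat = (n + 1 - 1).toNat := by omega
  rw [this]
  exact List.map_congr_left (fun k _ => by simp; ring)

-- closed form of the inner while loop for cap > 0
lemma pyWhile_eq (cap add d p a : Int) (hc : 0 < cap) :
    pyWhile cap add d p a =
      if 0 < max d p then
        (d - (-(PySem.Int.floordiv (-(max d p)) cap)) * cap,
         p - (-(PySem.Int.floordiv (-(max d p)) cap)) * cap,
         a + (-(PySem.Int.floordiv (-(max d p)) cap)) * add)
      else (d, p, a) := by
  have main : ∀ (N : Nat) (d p a : Int), (max d p).toNat ≤ N →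
      pyWhile cap add d p a =
        if 0 < max d p then
          (d - (-(PySem.Int.floordiv (-(max d p)) cap)) * cap,
           p - (-(PySem.Int.floordiv (-(max d p)) cap)) * cap,
           a + (-(PySem.Int.floordiv (-(max d p)) cap)) * add)
        else (d, p, a) := by
    intro N
    induction N with
    | zero =>
      intro d p a h
      have hd : d ≤ 0 := by have := le_max_left d p; omega
      have hp : p ≤ 0 := by have := le_max_right d p; omega
      rw [pyWhile]
      have h1 : ¬ (d > 0 ∨ p > 0) := by omega
      have h2 : ¬ 0 < max d p := by have := le_max_left d p; omega
      simp [h1, h2]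
    | succ N ih =>
      intro d p a h
      rw [pyWhile]
      by_cases h1 : d > 0 ∨ p > 0
      · have hm : 0 < max d p := by
          rcases h1 with h1 | h1
          · exact lt_of_lt_of_le h1 (le_max_left d p)
          · exact lt_of_lt_of_le h1 (le_max_right d p)
        have hmax : max (d - cap) (p - cap) = max d p - cap := by
          rcases le_total d p with hle | hle
          · rw [max_eq_right hle, max_eq_right (by omega : d - cap ≤ p - cap)]
          · rw [max_eq_left hle, max_eq_left (by omega : p - cap ≤ d - cap)]
        simp only [h1, if_true, hc, hm]
        rw [ih (d - cap) (p - cap) (a + add) (by omega)]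
        rw [hmax]
        by_cases h2 : 0 < max d p - cap
        · set t' := -(PySem.Int.floordiv (-(max d p - cap)) cap) with ht'
          have hb := (PySem.Int.neg_floordiv_neg_eq_iff_of_pos hc).mp ht'.symm
          have ht : -(PySem.Int.floordiv (-(max d p)) cap) = t' + 1 := by
            apply (PySem.Int.neg_floordiv_neg_eq_iff_of_pos hc).mpr
            have e1 : (t' - 1) * cap = t' * cap - cap := by ring
            have e2 : (t' + 1 - 1) * cap = t' * cap := by ring
            have e3 : (t' + 1) * cap = t' * cap + cap := by ring
            constructor
            · rw [e2]; linarith [hb.1, e1.symm.trans_le (le_of_eq rfl)]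
            · rw [e3]; linarith [hb.2]
          simp only [h2, if_true, ht]
          refine Prod.ext (by ring) (Prod.ext (by ring) (by ring))
        · have ht : -(PySem.Int.floordiv (-(max d p)) cap) = 1 := by
            apply (PySem.Int.neg_floordiv_neg_eq_iff_of_pos hc).mpr
            constructor
            · have : (1 - 1 : Int) * cap = 0 := by ring
              rw [this]; exact hm
            · have : (1 : Int) * cap = cap := by ring
              rw [this]; omega
          simp only [h2, if_false, ht]
          refine Prod.ext (by ring) (Prod.ext (by ring) (by ring))
      · have h2 : ¬ 0 < max d p := by
          rcases le_total d p with hle | hle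
          · rw [max_eq_right hle]; omega
          · rw [max_eq_left hle]; omega
        simp [h1, h2]
  exact main (max d p).toNat d p a le_rfl

-- fold agreement when cap ≤ 0 and all partial suffix loads stay nonpositive:
-- neither inner branch ever fires, so both folds just accumulate the loads.
lemma fold_nonpos (cap n : Int) (deliveries pickups : List Int) :
    ∀ (ks : List Int) (d p a : Int),
      (∀ j : Nat, d + (((ks.take j).map (fun k => PySem.List.pyGetD deliveries (-k) 0)).sum) ≤ 0) →
      (∀ j : Nat, p + (((ks.take j).map (fun k => PySem.List.pyGetD pickups (-k) 0)).sum) ≤ 0) →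
      ks.foldl
        (fun (st : Int × Int × Int) k =>
          pyWhile cap ((n + -k + 1) * 2)
            (st.1 + PySem.List.pyGetD deliveries (-k) 0)
            (st.2.1 + PySem.List.pyGetD pickups (-k) 0)
            st.2.2) (d, p, a)
      = ks.foldl
        (fun (st : Int × Int × Int) k =>
          let d := st.1 + PySem.List.pyGetD deliveries (-k) 0
          let p := st.2.1 + PySem.List.pyGetD pickups (-k) 0
          let m := max d p
          if 0 < m then
            let t := -(PySem.Int.floordiv (-m) cap)
            (d - t * cap, p - t * cap, st.2.2 + t * (n - k + 1) * 2)
          else (d, p, st.2.2)) (d, p, a) := by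
  intro ks
  induction ks with
  | nil => intro d p a _ _; rfl
  | cons k ks ih =>
    intro d p a hd hp
    have hd1 := hd 1
    have hp1 := hp 1
    simp only [List.take_succ_cons, List.take_zero, List.map_cons, List.map_nil,
      List.sum_cons, List.sum_nil, add_zero] at hd1 hp1
    simp only [List.foldl_cons]
    have hA : pyWhile cap ((n + -k + 1) * 2)
        (d + PySem.List.pyGetD deliveries (-k) 0)
        (p + PySem.List.pyGetD pickups (-k) 0) a
        = (d + PySem.List.pyGetD deliveries (-k) 0,
           p + PySem.List.pyGetD pickups (-k) 0, a) := by
      rw [pyWhile]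
      have h1 : ¬ (d + PySem.List.pyGetD deliveries (-k) 0 > 0 ∨
                   p + PySem.List.pyGetD pickups (-k) 0 > 0) := by omega
      simp [h1]
    have hm : ¬ 0 < max (d + PySem.List.pyGetD deliveries (-k) 0)
        (p + PySem.List.pyGetD pickups (-k) 0) := by
      have h1 := le_max_left (d + PySem.List.pyGetD deliveries (-k) 0)
        (p + PySem.List.pyGetD pickups (-k) 0)
      have h2 := le_max_right (d + PySem.List.pyGetD deliveries (-k) 0)
        (p + PySem.List.pyGetD pickups (-k) 0)
      omega
    rw [hA]
    simp only [hm, if_false]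
    apply ih
    · intro j
      have := hd (j + 1)
      simpa [add_assoc] using this
    · intro j
      have := hp (j + 1)
      simpa [add_assoc] using this

-- sum of the loads read by the first m loop steps = suffix sum of length m
lemma sum_gets (l : List Int) :
    ∀ (m : Nat), m ≤ l.length →
      (((PySem.List.pyRange 1 ((m : Int) + 1) 1).map (fun k => PySem.List.pyGetD l (-k) 0)).sum)
        = (l.drop (l.length - m)).sum := by
  intro m
  induction m with
  | zero => simp [PySem.List.pyRange_one_eq_nil]
  | succ m ih =>
    intro hm
    have hstep : PySem.List.pyRange 1 ((m : Int) + 1 + 1) 1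
        = PySem.List.pyRange 1 ((m : Int) + 1) 1 ++ [(m : Int) + 1] := by
      exact PySem.List.pyRange_one_succ_right (by omega)
    have hcast : ((m + 1 : Nat) : Int) + 1 = (m : Int) + 1 + 1 := by push_cast; ring
    rw [hcast, hstep, List.map_append, List.sum_append, ih (by omega)]
    have hget : PySem.List.pyGetD l (-((m : Int) + 1)) 0 = l[l.length - (m + 1)] := by
      have : -((m : Int) + 1) = -((m + 1 : Nat) : Int) := by push_cast; ring
      rw [this, PySem.List.pyGetD_neg_natCast _ _ _ (by omega) (by omega)]
    have hdrop : l.drop (l.length - (m + 1)) = l[l.length - (m + 1)] :: l.drop (l.length - m) := by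
      have h1 : l.length - (m + 1) < l.length := by omega
      have h2 : l.length - (m + 1) + 1 = l.length - m := by omega
      rw [List.drop_eq_getElem_cons h1, h2]
    rw [hdrop, List.sum_cons]
    simp only [List.map_cons, List.map_nil, List.sum_cons, List.sum_nil, add_zero]
    rw [hget]
    omega

-- take of the 1..n range is the 1..min range
lemma take_range (n : Int) (j : Nat) :
    (PySem.List.pyRange 1 (n + 1) 1).take j
      = PySem.List.pyRange 1 ((min j (n + 1 - 1).toNat : Nat) + 1) 1 := by
  rw [PySem.List.pyRange_one, PySem.List.pyRange_one, ← List.map_take, List.take_range]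
  congr 2
  omega

-- ===== VERDICT (by name: the statement is the Claim_ definition above) =====
theorem solution_spec : Claim_equal_solution := by
  intro cap n deliveries pickups hdom hpre
  unfold Spec_solution solution solution_alt
  rw [range_neg]
  simp only [List.foldl_map]
  by_cases hc : 0 < cap
  · have hfn : (fun (x : Int × Int × Int) (y : Int) =>
        pyWhile cap ((n + -y + 1) * 2) (x.1 + PySem.List.pyGetD deliveries (-y) 0)
          (x.2.1 + PySem.List.pyGetD pickups (-y) 0) x.2.2)
        = (fun (st : Int × Int × Int) (k : Int) =>
            let d := st.1 + PySem.List.pyGetD deliveries (-k) 0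
            let p := st.2.1 + PySem.List.pyGetD pickups (-k) 0
            let m := max d p
            if 0 < m then
              let t := -(PySem.Int.floordiv (-m) cap)
              (d - t * cap, p - t * cap, st.2.2 + t * (n - k + 1) * 2)
            else (d, p, st.2.2)) := by
      funext st k
      rw [pyWhile_eq cap ((n + -k + 1) * 2) _ _ _ hc]
      dsimp only
      split
      · refine Prod.ext rfl (Prod.ext rfl ?_)
        dsimp only
        ring
      · rfl
    rw [hfn]
  · rcases hpre with hn | ⟨hlen1, hlen2, hcap | hsuf⟩
    · rw [PySem.List.pyRange_one_eq_nil (by omega)]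
      rfl
    · exact absurd hcap hc
    · have key : ∀ (l : List Int), (n : Int) ≤ l.length →
          (∀ j ∈ List.range n.toNat, (l.drop (l.length - (j + 1))).sum ≤ 0) →
          ∀ j : Nat, (0 : Int) +
            ((((PySem.List.pyRange 1 (n + 1) 1).take j).map
              (fun k => PySem.List.pyGetD l (-k) 0)).sum) ≤ 0 := by
        intro l hl hs j
        rw [take_range, zero_add]
        rcases Nat.eq_zero_or_pos (min j (n + 1 - 1).toNat) with h0 | hpos
        · rw [h0]
          simp [PySem.List.pyRange_one_eq_nil]
        · obtain ⟨m, hm⟩ : ∃ m, min j (n + 1 - 1).toNat = m + 1 :=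
            ⟨(min j (n + 1 - 1).toNat) - 1, by omega⟩
          rw [hm, sum_gets l (m + 1) (by omega)]
          exact hs m (by simp only [List.mem_range]; omega)
      have keyd := key deliveries hlen1 (fun j hj => (hsuf j hj).1)
      have keyp := key pickups hlen2 (fun j hj => (hsuf j hj).2)
      exact congrArg (·.2.2)
        (fold_nonpos cap n deliveries pickups (PySem.List.pyRange 1 (n + 1) 1)
          0 0 0 keyd keyp)
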